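-- pv_equiv track=rewrite | github.com/jianningzhuang/CS1010X-Programming_Methodology | Midterms/Midterm Practice Part 1.py | replace_digit
-- ===== SOURCE A (Python) =====
-- def replace_digit(n, d, r):
--     if n < 10:
--         if n == d:
--             return r
--         else:
--             return n
--     else:
--         if n%10 == d:
--             return r + 10*replace_digit(n//10, d, r)
--         else:
--             return n%10 + 10*replace_digit(n//10, d, r)
-- ===== SOURCE B (Python) =====
-- def replace_digit(n, d, r):
--     result = 0
--     place = 1
--     while n >= 10:
--         digit = n % 10
--         result += (r if digit == d else digit) * place
--         place *= 10
--         n //= 10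
--     return result + (r if n == d else n) * place
-- ===== Notes on version B (the rewrite author's own statement) =====
-- stated objective: alternative
-- what changed: Replaces the recursion with an iterative loop that accumulates the rebuilt number least-significant digit first using an explicit place-value multiplier.
import Mathlib
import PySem

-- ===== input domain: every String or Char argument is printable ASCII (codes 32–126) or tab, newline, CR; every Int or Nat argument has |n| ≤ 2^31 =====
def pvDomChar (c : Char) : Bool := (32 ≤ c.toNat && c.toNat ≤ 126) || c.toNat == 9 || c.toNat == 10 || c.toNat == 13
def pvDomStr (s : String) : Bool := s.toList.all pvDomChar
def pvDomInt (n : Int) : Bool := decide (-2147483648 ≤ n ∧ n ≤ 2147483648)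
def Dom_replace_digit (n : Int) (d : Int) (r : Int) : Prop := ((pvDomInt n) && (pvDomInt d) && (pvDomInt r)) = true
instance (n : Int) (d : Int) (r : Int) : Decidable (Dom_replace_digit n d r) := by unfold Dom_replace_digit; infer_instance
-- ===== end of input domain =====

-- B rebuilds the number iteratively with an accumulator and place-value multiplier instead of A's recursion; alternative decomposition, same cost.

-- ===== PORT A =====
def replace_digit (n : Int) (d : Int) (r : Int) : Int :=
  if n < 10 then
    if n = d then r else n
  else
    if PySem.Int.mod n 10 = d then
      r + 10 * replace_digit (PySem.Int.floordiv n 10) d r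
    else
      PySem.Int.mod n 10 + 10 * replace_digit (PySem.Int.floordiv n 10) d r
termination_by n.toNat
decreasing_by
  all_goals rw [PySem.Int.floordiv_eq_ediv_of_pos (by norm_num)]; omega

-- ===== PORT B =====
-- the while loop of Source B, state (n, result, place)
def replace_digit_loop (n : Int) (d : Int) (r : Int) (result : Int) (place : Int) : Int :=
  if 10 ≤ n then
    replace_digit_loop (PySem.Int.floordiv n 10) d r
      (result + (if PySem.Int.mod n 10 = d then r else PySem.Int.mod n 10) * place)
      (place * 10)
  else
    result + (if n = d then r else n) * place
termination_by n.toNat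
decreasing_by
  all_goals rw [PySem.Int.floordiv_eq_ediv_of_pos (by norm_num)]; omega

def replace_digit_alt (n : Int) (d : Int) (r : Int) : Int :=
  replace_digit_loop n d r 0 1

-- ===== PRECONDITION & SPEC =====
def Spec_replace_digit (n : Int) (d : Int) (r : Int) (out : Int) : Prop := out = replace_digit_alt n d r
instance (n : Int) (d : Int) (r : Int) (out : Int) : Decidable (Spec_replace_digit n d r out) := by unfold Spec_replace_digit; infer_instance

-- ===== CLAIM (what is proved, stated in full; the proofs are below) =====
def Claim_equal_replace_digit : Prop := ∀ (n : Int) (d : Int) (r : Int), Dom_replace_digit n d r → Spec_replace_digit n d r (replace_digit n d r)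

-- ===== LEMMAS AND PROOFS =====

-- loop invariant: the loop returns result + place * (A's value on the remaining n)
theorem replace_digit_loop_eq (n d r result place : Int) :
    replace_digit_loop n d r result place = result + place * replace_digit n d r := by
  fun_induction replace_digit_loop n d r result place with
  | case1 a b c h ih =>
      simp only [dite_eq_ite] at ih
      rw [ih]
      conv_rhs => rw [replace_digit]
      rw [if_neg (show ¬ a < 10 by omega)]
      split <;> ring
  | case2 a b c h =>
      rw [replace_digit, if_pos (show a < 10 by omega)]
      split <;> ring

-- ===== VERDICT (by name: the statement is the Claim_ definition above) =====
theorem replace_digit_spec : Claim_equal_replace_digit := by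
  intro n d r _
  unfold Spec_replace_digit replace_digit_alt
  rw [replace_digit_loop_eq]
  ring
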